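-- pv_equiv track=rewrite | github.com/ArtRabs/freecodecamp-daily-coding-challenge | 2026-01-06_vowelcase.py | vowel_case
-- ===== SOURCE A (Python) =====
-- def vowel_case(s):
--
--     vowel = "aeiouAEIOU"
--     word = ""
--
--     for letter in s:
--
--         if letter in vowel:
--
--             word += letter.upper()
--
--         elif letter not in vowel:
--
--             word += letter.lower()
--
--         else:
--
--             word += letter
--
--     return word
-- ===== SOURCE B (Python) =====
-- def vowel_case(s):
--     word = s.lower()
--     for v in "aeiou":
--         word = word.replace(v, v.upper())
--     return word
-- ===== Notes on version B (the rewrite author's own statement) =====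
-- stated objective: faster
-- what changed: B lowercases the whole string once and then runs five whole-string str.replace passes (one per vowel) to uppercase the vowels, instead of A's single per-character Python loop that branches between .upper() and .lower() while concatenating.
import Mathlib
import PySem

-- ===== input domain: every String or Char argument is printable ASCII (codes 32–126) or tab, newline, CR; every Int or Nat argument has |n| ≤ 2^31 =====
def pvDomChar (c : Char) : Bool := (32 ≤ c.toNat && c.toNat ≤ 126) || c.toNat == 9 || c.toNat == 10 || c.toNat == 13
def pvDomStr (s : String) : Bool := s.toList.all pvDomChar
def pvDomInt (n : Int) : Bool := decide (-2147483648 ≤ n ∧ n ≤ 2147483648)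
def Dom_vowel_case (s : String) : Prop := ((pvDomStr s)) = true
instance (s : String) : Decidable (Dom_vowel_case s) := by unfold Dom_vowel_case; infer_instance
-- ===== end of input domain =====

-- B lowercases the whole string once, then runs five whole-string replace passes (one per vowel) to uppercase the vowels (alternative decomposition; return value only).


-- ===== PORT A =====
-- loop: word += letter.upper() if vowel else letter.lower(); accumulator over List Char
def vowel_case (s : String) : String :=
  String.ofList (s.toList.foldl
    (fun word letter =>
      if "aeiouAEIOU".toList.contains letter then
        word ++ [PySem.Chars.upperChar letter]
      else
        word ++ [PySem.Chars.lowerChar letter])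
    [])

-- ===== PORT B =====
-- word = s.lower(); for v in "aeiou": word = word.replace(v, v.upper())
def vowel_case_alt (s : String) : String :=
  "aeiou".toList.foldl
    (fun word v =>
      PySem.Str.replace word (String.ofList [v]) (String.ofList [PySem.Chars.upperChar v]))
    (PySem.Str.lower s)

-- ===== PRECONDITION & SPEC =====
def Spec_vowel_case (s : String) (out : String) : Prop := out = vowel_case_alt s
instance (s : String) (out : String) : Decidable (Spec_vowel_case s out) := by unfold Spec_vowel_case; infer_instance

-- ===== CLAIM (what is proved, stated in full; the proofs are below) =====
def Claim_equal_vowel_case : Prop := ∀ (s : String), Dom_vowel_case s → Spec_vowel_case s (vowel_case s)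

-- ===== LEMMAS AND PROOFS =====

-- A's append-loop is a map
theorem foldl_branch_append {α β : Type} (p : α → Bool) (f g : α → β)
    (l : List α) (acc : List β) :
    l.foldl (fun w c => if p c then w ++ [f c] else w ++ [g c]) acc
      = acc ++ l.map (fun c => if p c then f c else g c) := by
  induction l generalizing acc with
  | nil => simp
  | cons x xs ih => by_cases h : p x <;> simp [List.foldl, h, ih]

-- single-character replace is a map (replace.go consumes one char per fuel step)
theorem replace_go_single (a b : Char) (l : List Char) :
    ∀ (fuel : Nat) (acc : List Char), l.length ≤ fuel →
    PySem.Chars.replace.go [a] [b] fuel l acc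
      = acc.reverse ++ l.map (fun c => if c = a then b else c) := by
  induction l with
  | nil =>
    intro fuel acc _
    cases fuel <;> simp [PySem.Chars.replace.go]
  | cons c t ih =>
    intro fuel acc hle
    cases fuel with
    | zero => simp at hle
    | succ n =>
      have ht : t.length ≤ n := by simpa using hle
      by_cases h : c = a
      · have hpre : List.isPrefixOf [a] (c :: t) = true := by
          simp [List.isPrefixOf, h]
        simp [PySem.Chars.replace.go, ih n _ ht, h]
      · have hpre : List.isPrefixOf [a] (c :: t) = false := by
          simp [List.isPrefixOf]
          exact fun hh => h hh.symm
        simp [PySem.Chars.replace.go, hpre, h, ih n _ ht]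

theorem replace_single (a b : Char) (l : List Char) :
    PySem.Chars.replace l [a] [b] = l.map (fun c => if c = a then b else c) := by
  simp [PySem.Chars.replace, replace_go_single a b l l.length [] (le_refl _)]

-- pointwise agreement of the composed replace maps with A's branch, on ASCII
theorem char_step (c : Char) (h : pvDomChar c = true) :
    (if "aeiouAEIOU".toList.contains c then PySem.Chars.upperChar c
     else PySem.Chars.lowerChar c)
    = (fun x => if x = 'u' then 'U' else x)
      ((fun x => if x = 'o' then 'O' else x)
       ((fun x => if x = 'i' then 'I' else x)
        ((fun x => if x = 'e' then 'E' else x)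
         ((fun x => if x = 'a' then 'A' else x)
          (PySem.Chars.lowerChar c))))) := by
  have hlt : c.toNat < 127 := by
    simp only [pvDomChar, Bool.or_eq_true, Bool.and_eq_true, decide_eq_true_eq,
      beq_iff_eq] at h
    omega
  have key : ∀ n : Nat, n < 127 →
      (if "aeiouAEIOU".toList.contains (Char.ofNat n) then PySem.Chars.upperChar (Char.ofNat n)
       else PySem.Chars.lowerChar (Char.ofNat n))
      = (fun x => if x = 'u' then 'U' else x)
        ((fun x => if x = 'o' then 'O' else x)
         ((fun x => if x = 'i' then 'I' else x)
          ((fun x => if x = 'e' then 'E' else x)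
           ((fun x => if x = 'a' then 'A' else x)
            (PySem.Chars.lowerChar (Char.ofNat n)))))) := by decide
  have hc : Char.ofNat c.toNat = c := Char.ofNat_toNat c
  have := key c.toNat hlt
  rwa [hc] at this

-- ===== VERDICT (by name: the statement is the Claim_ definition above) =====
theorem vowel_case_spec : Claim_equal_vowel_case := by
  intro s hdom
  unfold Spec_vowel_case vowel_case vowel_case_alt
  rw [foldl_branch_append (fun letter => "aeiouAEIOU".toList.contains letter)
      PySem.Chars.upperChar PySem.Chars.lowerChar s.toList []]
  simp only [show "aeiou".toList = ['a','e','i','o','u'] from rfl, List.foldl]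
  apply String.ext
  simp only [PySem.Str.toList_replace, PySem.Str.toList_lower, String.toList_ofList,
    replace_single, List.map_map, List.nil_append]
  have hlow : PySem.Chars.lower s.toList = s.toList.map PySem.Chars.lowerChar := by
    simp [PySem.Chars.lower]
  rw [hlow, List.map_map]
  apply List.map_congr_left
  intro c hc
  have hdc : pvDomChar c = true := by
    have := (List.all_eq_true.mp hdom) c hc
    simpa using this
  simpa [Function.comp] using char_step c hdc
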